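-- pv_equiv track=rewrite | github.com/pfeddy91/wanderlust-havens | populate_other_tables.py | extract_unique_regions_countries
-- ===== SOURCE A (Python) =====
-- from typing import List, Dict, Optional, Any # Added typing
--
-- def extract_unique_regions_countries(tours_data: List[Dict[str, str]]) -> Dict[str, List[str]]:
--     """Extract unique regions and their associated countries from tour data"""
--     # Assumes '1) Category' is Region and '5) Primary country' is Country
--     region_to_countries = {}
--     for tour in tours_data:
--         region_name = tour.get('1) Category')
--         country_name = tour.get('5) Primary country')
--
--         if region_name and country_name:
--             region_name = region_name.strip()
--             country_name = country_name.strip()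
--             if region_name not in region_to_countries:
--                 region_to_countries[region_name] = set() # Use set for uniqueness
--             region_to_countries[region_name].add(country_name)
--
--     # Convert sets to lists
--     result = {region: sorted(list(countries)) for region, countries in region_to_countries.items()}
--     return result
-- ===== SOURCE B (Python) =====
-- def extract_unique_regions_countries(tours_data):
--     """Extract unique regions and their associated countries from tour data"""
--     # Phase 1: flatten into a list of (region, country) pairs (guard before strip,
--     # matching the intended truthiness check on the raw values).
--     pairs = []
--     for tour in tours_data:
--         r = tour.get('1) Category')
--         c = tour.get('5) Primary country')
--         if r and c:
--             pairs.append((r.strip(), c.strip()))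
--     # Phase 2: regions in first-occurrence order; each region's countries as a
--     # sorted deduplicated selection from the flat pair list.
--     return {r: sorted({c for r2, c in pairs if r2 == r})
--             for r in dict.fromkeys(r for r, _ in pairs)}
-- ===== Notes on version B (the rewrite author's own statement) =====
-- stated objective: alternative
-- what changed: Replaces the single-pass dict-of-sets accumulation with a two-phase pipeline: first flatten the tours into a list of stripped (region, country) pairs, then build the result by one comprehension per distinct region, deduplicating and sorting its countries from the flat list.
import Mathlib
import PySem

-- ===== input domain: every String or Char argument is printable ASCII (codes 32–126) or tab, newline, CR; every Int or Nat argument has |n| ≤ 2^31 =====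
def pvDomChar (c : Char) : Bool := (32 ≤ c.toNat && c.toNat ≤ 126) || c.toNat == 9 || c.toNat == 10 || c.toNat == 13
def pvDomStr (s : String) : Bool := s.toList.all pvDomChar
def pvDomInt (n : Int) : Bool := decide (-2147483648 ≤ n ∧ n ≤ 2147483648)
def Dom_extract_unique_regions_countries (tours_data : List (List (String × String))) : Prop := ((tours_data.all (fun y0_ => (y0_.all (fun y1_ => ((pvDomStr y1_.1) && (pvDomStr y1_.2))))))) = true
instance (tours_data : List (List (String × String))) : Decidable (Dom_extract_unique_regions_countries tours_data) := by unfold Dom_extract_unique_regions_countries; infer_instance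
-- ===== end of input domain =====

-- B replaces A's single-pass dict-of-sets accumulation by a two-phase pipeline (flat pair list,
-- then one pass per distinct region); alternative decomposition, no speed claim.


-- ===== PORT A =====
-- shared helper: tour.get('1) Category') / tour.get('5) Primary country'), the `if r and c`
-- guard on the raw values, then .strip() — these lines are identical in Source A and Source B
def pvPair (tour : List (String × String)) : Option (String × String) :=
  match (PySem.Dict.mk tour).get? "1) Category", (PySem.Dict.mk tour).get? "5) Primary country" with
  | some r, some c =>
      if r ≠ "" ∧ c ≠ "" then some (PySem.Str.strip r, PySem.Str.strip c) else none
  | _, _ => none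

-- the tour loop: ensure-key-then-add is Python's d[r] = (d.get(r, set())).add(c), i.e. Dict.modify
def extract_unique_regions_countries (tours_data : List (List (String × String))) : List (String × List String) :=
  (tours_data.foldl (fun d tour =>
      match pvPair tour with
      | some (r, c) => d.modify r PySem.Set.empty (fun s => PySem.Set.add s c)
      | none => d) PySem.Dict.empty).items.map
    (fun p => (p.1, PySem.List.sorted p.2 (fun x => x) false))

-- ===== PORT B =====
-- phase 1 of Source B: the flat list of stripped (region, country) pairs
def pvPairsB (tours_data : List (List (String × String))) : List (String × String) :=
  tours_data.foldl (fun ps tour =>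
    match pvPair tour with
    | some p => ps ++ [p]
    | none => ps) []

-- phase 2 of Source B: dict.fromkeys over regions, sorted set-comprehension per region
def extract_unique_regions_countries_alt (tours_data : List (List (String × String))) : List (String × List String) :=
  (PySem.List.dedup ((pvPairsB tours_data).map Prod.fst)).map (fun r =>
    (r, PySem.List.sorted
          (PySem.Set.ofList (((pvPairsB tours_data).filter (fun q => q.1 == r)).map Prod.snd))
          (fun x => x) false))

-- ===== PRECONDITION & SPEC =====
def Spec_extract_unique_regions_countries (tours_data : List (List (String × String))) (out : List (String × List String)) : Prop := out = extract_unique_regions_countries_alt tours_data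
instance (tours_data : List (List (String × String))) (out : List (String × List String)) : Decidable (Spec_extract_unique_regions_countries tours_data out) := by unfold Spec_extract_unique_regions_countries; infer_instance

-- ===== CLAIM (what is proved, stated in full; the proofs are below) =====
def Claim_equal_extract_unique_regions_countries : Prop := ∀ (tours_data : List (List (String × String))), Dom_extract_unique_regions_countries tours_data → Spec_extract_unique_regions_countries tours_data (extract_unique_regions_countries tours_data)

-- ===== LEMMAS AND PROOFS =====

-- A's tour loop is the pair-by-pair modify loop over the flat pair list
lemma foldA_eq (ts : List (List (String × String))) (d : PySem.Dict String (PySem.Set String)) :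
    ts.foldl (fun d tour =>
      match pvPair tour with
      | some (r, c) => d.modify r PySem.Set.empty (fun s => PySem.Set.add s c)
      | none => d) d
    = (ts.filterMap pvPair).foldl
        (fun d p => d.modify p.1 PySem.Set.empty (fun s => PySem.Set.add s p.2)) d := by
  induction ts generalizing d with
  | nil => rfl
  | cons t ts ih =>
    simp only [List.foldl_cons, List.filterMap_cons]
    cases h : pvPair t with
    | none => exact ih d
    | some p => cases p; exact ih _

-- B's pair-collecting loop builds the flat pair list
lemma foldB_eq (ts : List (List (String × String))) :
    pvPairsB ts = ts.filterMap pvPair := by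
  have key : ∀ (ts : List (List (String × String))) (ps : List (String × String)),
      ts.foldl (fun ps tour =>
        match pvPair tour with
        | some p => ps ++ [p]
        | none => ps) ps = ps ++ ts.filterMap pvPair := by
    intro ts
    induction ts with
    | nil => simp
    | cons t ts ih =>
      intro ps
      simp only [List.foldl_cons, List.filterMap_cons]
      cases h : pvPair t with
      | none => simp [ih]
      | some p => simp [ih]
  simpa using key ts []

-- the value stored at region r after the modify loop
lemma getD_foldM (l : List (String × String)) (d : PySem.Dict String (PySem.Set String)) (r : String) :
    (l.foldl (fun d p => d.modify p.1 PySem.Set.empty (fun s => PySem.Set.add s p.2)) d).getD r PySem.Set.empty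
    = PySem.Set.update (d.getD r PySem.Set.empty) ((l.filter (fun q => q.1 == r)).map Prod.snd) := by
  induction l generalizing d with
  | nil => simp [PySem.Set.update]
  | cons p l ih =>
    simp only [List.foldl_cons, List.filter_cons]
    by_cases h : p.1 = r
    · subst h
      rw [ih, PySem.Dict.getD_modify_self]
      simp [PySem.Set.update_cons]
    · have hb : (p.1 == r) = false := by simp [h]
      rw [ih, PySem.Dict.getD_modify, if_neg (fun hr => h hr.symm)]
      simp [hb]

lemma spec_main (ts : List (List (String × String))) :
    extract_unique_regions_countries ts = extract_unique_regions_countries_alt ts := by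
  unfold extract_unique_regions_countries extract_unique_regions_countries_alt
  rw [foldA_eq, foldB_eq]
  set l := ts.filterMap pvPair with hl
  set d := l.foldl (fun d p => d.modify p.1 PySem.Set.empty (fun s => PySem.Set.add s p.2))
             PySem.Dict.empty with hd
  have hkeys : d.keys = PySem.Set.ofList (l.map Prod.fst) := by
    rw [hd, PySem.Dict.keys_foldl_modify_key l Prod.fst PySem.Set.empty
          (fun d p => fun s => PySem.Set.add s p.2) PySem.Dict.empty]
    simp [PySem.Dict.keys_empty, PySem.Set.update, PySem.Set.ofList_eq_foldl]
  have hnd : d.keys.Nodup := by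
    rw [hkeys]; exact PySem.Set.nodup_ofList _
  have hgetD : ∀ r, d.getD r PySem.Set.empty
      = PySem.Set.ofList ((l.filter (fun q => q.1 == r)).map Prod.snd) := by
    intro r
    rw [hd, getD_foldM]
    simp [PySem.Dict.getD_empty, PySem.Set.update, PySem.Set.ofList_eq_foldl, PySem.Set.empty]
  have hB : PySem.List.dedup (l.map Prod.fst) = d.keys := by
    simp [hkeys]
  rw [hB]
  have hkeys_map : d.keys = d.items.map Prod.fst := rfl
  rw [hkeys_map, List.map_map]
  apply List.map_congr_left
  intro p hp
  obtain ⟨k, v⟩ := p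
  have hval : d.getD k PySem.Set.empty = v :=
    PySem.Dict.getD_of_mem_items (d := d) (h := hp) (hnd := hnd) PySem.Set.empty
  simp only [Function.comp]
  rw [← hval, hgetD k]

-- ===== VERDICT (by name: the statement is the Claim_ definition above) =====
theorem extract_unique_regions_countries_spec : Claim_equal_extract_unique_regions_countries := by
  intro ts _
  unfold Spec_extract_unique_regions_countries
  exact spec_main ts
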